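-- pv_equiv track=rewrite | github.com/septimium/bioinformatics | Project_L12/assign3.py | assign_symbols
-- ===== SOURCE A (Python) =====
-- def assign_symbols(words):
--     unique_words = []
--     seen = set()
--
--     for word in words:
--         if word not in seen:
--             unique_words.append(word)
--             seen.add(word)
--
--     word_to_symbol = {word: f"S{i}" for i, word in enumerate(unique_words)}
--     symbol_to_word = {f"S{i}": word for i, word in enumerate(unique_words)}
--
--     return word_to_symbol, symbol_to_word
-- ===== SOURCE B (Python) =====
-- def assign_symbols(words):
--     word_to_symbol = {}
--     symbol_to_word = {}
--     for word in words:
--         if word not in word_to_symbol: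
--             symbol = f"S{len(word_to_symbol)}"
--             word_to_symbol[word] = symbol
--             symbol_to_word[symbol] = word
--     return word_to_symbol, symbol_to_word
-- ===== Notes on version B (the rewrite author's own statement) =====
-- stated objective: simpler
-- what changed: Single pass maintaining only the two dicts (using word_to_symbol itself as the seen-set and its size as the counter), eliminating the intermediate unique_words list, the seen set and both enumerate comprehensions.
import Mathlib
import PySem

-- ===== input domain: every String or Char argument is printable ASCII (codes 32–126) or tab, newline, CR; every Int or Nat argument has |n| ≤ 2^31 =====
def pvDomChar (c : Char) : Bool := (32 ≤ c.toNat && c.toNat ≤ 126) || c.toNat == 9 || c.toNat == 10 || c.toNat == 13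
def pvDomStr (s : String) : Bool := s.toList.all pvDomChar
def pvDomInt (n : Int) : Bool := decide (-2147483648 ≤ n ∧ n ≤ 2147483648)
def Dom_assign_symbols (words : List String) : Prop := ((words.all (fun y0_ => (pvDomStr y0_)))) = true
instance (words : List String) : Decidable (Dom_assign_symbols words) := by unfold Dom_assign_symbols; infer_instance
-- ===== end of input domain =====

-- B fuses A's dedup pass and both enumerate comprehensions into one pass maintaining just the two dicts (simpler decomposition, same cost).


-- ===== PORT A =====
-- A: dedup loop building unique_words and a seen set, then two dict comprehensions over enumerate(unique_words).
def assign_symbols (words : List String) : (List (String × String)) × (List (String × String)) :=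
  let st := words.foldl
    (fun (st : List String × PySem.Set String) word =>
      if PySem.Set.contains st.2 word then st
      else (st.1 ++ [word], PySem.Set.add st.2 word))
    ([], PySem.Set.empty)
  let unique_words := st.1
  -- keys are distinct, so each dict comprehension is the association list in enumeration order
  let word_to_symbol := (PySem.List.enumerate unique_words).map
    (fun p => (p.2, "S" ++ PySem.Int.toStr p.1))
  let symbol_to_word := (PySem.List.enumerate unique_words).map
    (fun p => ("S" ++ PySem.Int.toStr p.1, p.2))
  (word_to_symbol, symbol_to_word)

-- ===== PORT B =====
-- B: one loop; the dicts (assoc lists with fresh keys, so insertion = append) are the whole state;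
-- `word not in word_to_symbol` is a key-membership test on the first dict.
def assign_symbols_alt (words : List String) : (List (String × String)) × (List (String × String)) :=
  words.foldl
    (fun (st : List (String × String) × List (String × String)) word =>
      if (st.1.map Prod.fst).contains word then st
      else
        let symbol := "S" ++ PySem.Int.toStr (st.1.length : Int)
        (st.1 ++ [(word, symbol)], st.2 ++ [(symbol, word)]))
    ([], [])

-- ===== PRECONDITION & SPEC =====
def Spec_assign_symbols (words : List String) (out : (List (String × String)) × (List (String × String))) : Prop := out = assign_symbols_alt words
instance (words : List String) (out : (List (String × String)) × (List (String × String))) : Decidable (Spec_assign_symbols words out) := by unfold Spec_assign_symbols; infer_instance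

-- ===== CLAIM (what is proved, stated in full; the proofs are below) =====
def Claim_equal_assign_symbols : Prop := ∀ (words : List String), Dom_assign_symbols words → Spec_assign_symbols words (assign_symbols words)

-- ===== LEMMAS AND PROOFS =====

-- the two dicts generated from a unique-word list u
def pvM1 (u : List String) : List (String × String) :=
  (PySem.List.enumerate u).map (fun p => (p.2, "S" ++ PySem.Int.toStr p.1))
def pvM2 (u : List String) : List (String × String) :=
  (PySem.List.enumerate u).map (fun p => ("S" ++ PySem.Int.toStr p.1, p.2))

theorem pvM1_fst (u : List String) : (pvM1 u).map Prod.fst = u := by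
  simp [pvM1, List.map_map, Function.comp_def, PySem.List.map_snd_enumerate]

theorem pvM1_len (u : List String) : (pvM1 u).length = u.length := by
  simp [pvM1, PySem.List.length_enumerate]

theorem pvM1_append (u : List String) (w : String) :
    pvM1 (u ++ [w]) = pvM1 u ++ [(w, "S" ++ PySem.Int.toStr (u.length : Int))] := by
  simp [pvM1, PySem.List.enumerate_append, PySem.List.enumerate_cons]

theorem pvM2_append (u : List String) (w : String) :
    pvM2 (u ++ [w]) = pvM2 u ++ [("S" ++ PySem.Int.toStr (u.length : Int), w)] := by
  simp [pvM2, PySem.List.enumerate_append, PySem.List.enumerate_cons]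

-- main loop invariant: A's state (u, set u) corresponds to B's state (pvM1 u, pvM2 u)
theorem pvLoop (words : List String) : ∀ (u : List String),
    (words.foldl
      (fun (st : List (String × String) × List (String × String)) word =>
        if (st.1.map Prod.fst).contains word then st
        else
          let symbol := "S" ++ PySem.Int.toStr (st.1.length : Int)
          (st.1 ++ [(word, symbol)], st.2 ++ [(symbol, word)]))
      (pvM1 u, pvM2 u))
      =
    (pvM1 (words.foldl
      (fun (st : List String × PySem.Set String) word =>
        if PySem.Set.contains st.2 word then st
        else (st.1 ++ [word], PySem.Set.add st.2 word)) (u, (u : PySem.Set String))).1,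
     pvM2 (words.foldl
      (fun (st : List String × PySem.Set String) word =>
        if PySem.Set.contains st.2 word then st
        else (st.1 ++ [word], PySem.Set.add st.2 word)) (u, (u : PySem.Set String))).1) := by
  induction words with
  | nil => intro u; rfl
  | cons w ws ih =>
    intro u
    simp only [List.foldl_cons]
    by_cases h : w ∈ u
    · have hc : ((pvM1 u).map Prod.fst).contains w = true := by
        rw [pvM1_fst]; simpa using h
      have hs : PySem.Set.contains (u : PySem.Set String) w = true := by
        simp [PySem.Set.contains]; simpa using h
      rw [hc, hs]
      simp only [if_true]
      exact ih u
    · have hc : ((pvM1 u).map Prod.fst).contains w = false := by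
        rw [pvM1_fst]; simpa using h
      have hs : PySem.Set.contains (u : PySem.Set String) w = false := by
        simp [PySem.Set.contains]; simpa using h
      rw [hc, hs]
      simp only [if_false, Bool.false_eq_true]
      have hadd : PySem.Set.add (u : PySem.Set String) w = ((u ++ [w] : List String) : PySem.Set String) := by
        simp [PySem.Set.add, h]
      rw [pvM1_len, ← pvM1_append, ← pvM2_append, hadd]
      exact ih (u ++ [w])

-- ===== VERDICT (by name: the statement is the Claim_ definition above) =====
theorem assign_symbols_spec : Claim_equal_assign_symbols := by
  intro words _
  show assign_symbols words = assign_symbols_alt words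
  unfold assign_symbols assign_symbols_alt
  have := (pvLoop words []).symm
  simpa [pvM1, pvM2, PySem.Set.empty] using this
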